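-- pv_equiv track=rewrite | github.com/kamimrcht/CARNAC-LR | scripts/representant_graph.py | compute_max_j_Rij
-- ===== SOURCE A (Python) =====
-- def compute_max_j_Rij(allClusterVectors, max_j, clusters):
-- 		clusterToReprGene = dict()
-- 		for result_clust in allClusterVectors.keys():
-- 			if len(clusters[result_clust]) > 1 :
-- 				maxj = 0
-- 				for gene in range(len(allClusterVectors[result_clust])):
-- 					if allClusterVectors[result_clust][gene] > maxj:
-- 						maxj = allClusterVectors[result_clust][gene]
-- 						clusterToReprGene[result_clust] = gene
-- 		return clusterToReprGene
-- ===== SOURCE B (Python) =====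
-- def compute_max_j_Rij(allClusterVectors, max_j, clusters):
--     clusterToReprGene = {}
--     for result_clust, vec in allClusterVectors.items():
--         if len(clusters[result_clust]) > 1 and vec:
--             m = max(vec)
--             if m > 0:
--                 clusterToReprGene[result_clust] = vec.index(m)
--     return clusterToReprGene
-- ===== Notes on version B (the rewrite author's own statement) =====
-- stated objective: idiomatic
-- what changed: Replaces the hand-rolled running-max/argmax scan that repeatedly overwrites the dict entry with the standard max() followed by .index() to locate its first occurrence, guarded by an explicit non-empty/positive test.
import Mathlib
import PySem

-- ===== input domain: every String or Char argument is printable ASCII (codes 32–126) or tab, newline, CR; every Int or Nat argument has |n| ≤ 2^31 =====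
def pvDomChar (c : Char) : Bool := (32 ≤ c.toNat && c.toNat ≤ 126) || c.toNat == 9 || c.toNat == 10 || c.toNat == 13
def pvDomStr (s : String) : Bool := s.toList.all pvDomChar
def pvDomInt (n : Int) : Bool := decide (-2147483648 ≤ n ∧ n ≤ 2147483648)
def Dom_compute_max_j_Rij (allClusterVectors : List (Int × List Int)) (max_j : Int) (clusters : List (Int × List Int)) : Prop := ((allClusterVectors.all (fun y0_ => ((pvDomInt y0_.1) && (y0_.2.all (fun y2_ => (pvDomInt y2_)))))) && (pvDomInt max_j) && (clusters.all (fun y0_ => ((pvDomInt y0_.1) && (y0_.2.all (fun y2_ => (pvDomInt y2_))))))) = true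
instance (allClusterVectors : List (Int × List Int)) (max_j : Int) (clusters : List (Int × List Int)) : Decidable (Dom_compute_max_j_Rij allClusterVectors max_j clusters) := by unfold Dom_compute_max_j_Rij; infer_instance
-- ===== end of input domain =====

-- B replaces A's running-max/argmax scan by max() followed by .index() (idiomatic); equal return values proved on Pre_ (where no KeyError occurs).

-- ===== PORT A =====
-- inner loop body: 'if vec[gene] > maxj: maxj = vec[gene]; clusterToReprGene[k] = gene'
def pvStepA (k : Int) (st : Int × PySem.Dict Int Int) (p : Int × Int) : Int × PySem.Dict Int Int :=
  if p.2 > st.1 then (p.2, st.2.insert k p.1) else st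

def compute_max_j_Rij (allClusterVectors : List (Int × List Int)) (max_j : Int) (clusters : List (Int × List Int)) : List (Int × Int) :=
  let avd := PySem.Dict.ofList allClusterVectors
  let cld := PySem.Dict.ofList clusters
  (avd.keys.foldl (fun d k =>
      match cld.get? k with
      | none => d   -- Python raises KeyError here; such inputs are excluded by Pre_
      | some cvec =>
        if cvec.length > 1 then
          -- 'for gene in range(len(avd[k]))' with indexing = loop over enumerate(avd[k])
          ((PySem.List.enumerate (avd.getD k []) 0).foldl (pvStepA k) (0, d)).2
        else d) PySem.Dict.empty).items

-- ===== PORT B =====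
def compute_max_j_Rij_alt (allClusterVectors : List (Int × List Int)) (max_j : Int) (clusters : List (Int × List Int)) : List (Int × Int) :=
  let avd := PySem.Dict.ofList allClusterVectors
  let cld := PySem.Dict.ofList clusters
  (avd.items.foldl (fun d p =>
      -- 'if len(clusters[k]) > 1 and vec:'  (missing key excluded by Pre_)
      if (cld.getD p.1 []).length > 1 ∧ p.2 ≠ [] then
        match PySem.List.max? p.2 (fun x => x) with
        | some m => if m > 0 then d.insert p.1 (((PySem.List.index? p.2 m).getD 0 : Nat) : Int) else d
        | none => d
      else d) PySem.Dict.empty).items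

-- ===== PRECONDITION & SPEC =====
-- Pre_ excludes exactly the inputs where Python A raises KeyError: a cluster id of allClusterVectors missing from clusters.
def Pre_compute_max_j_Rij (allClusterVectors : List (Int × List Int)) (max_j : Int) (clusters : List (Int × List Int)) : Prop :=
  (allClusterVectors.all (fun p => clusters.any (fun q => q.1 == p.1))) = true
instance (allClusterVectors : List (Int × List Int)) (max_j : Int) (clusters : List (Int × List Int)) : Decidable (Pre_compute_max_j_Rij allClusterVectors max_j clusters) := by unfold Pre_compute_max_j_Rij; infer_instance
def pvWitness_compute_max_j_Rij : (List (Int × List Int)) × Int × (List (Int × List Int)) :=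
  ([(0, [1, 3, 3]), (1, [2])], 0, [(0, [5, 6]), (1, [7, 8])])

def Spec_compute_max_j_Rij (allClusterVectors : List (Int × List Int)) (max_j : Int) (clusters : List (Int × List Int)) (out : List (Int × Int)) : Prop := out = compute_max_j_Rij_alt allClusterVectors max_j clusters
instance (allClusterVectors : List (Int × List Int)) (max_j : Int) (clusters : List (Int × List Int)) (out : List (Int × Int)) : Decidable (Spec_compute_max_j_Rij allClusterVectors max_j clusters out) := by unfold Spec_compute_max_j_Rij; infer_instance

-- ===== CLAIM (what is proved, stated in full; the proofs are below) =====
def Claim_equal_compute_max_j_Rij : Prop := ∀ (allClusterVectors : List (Int × List Int)) (max_j : Int) (clusters : List (Int × List Int)), Dom_compute_max_j_Rij allClusterVectors max_j clusters → Pre_compute_max_j_Rij allClusterVectors max_j clusters → Spec_compute_max_j_Rij allClusterVectors max_j clusters (compute_max_j_Rij allClusterVectors max_j clusters)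

-- ===== LEMMAS AND PROOFS =====

-- the running max either stays at its seed or is an element of the list
lemma pv_foldl_max_mem (l : List Int) : ∀ c : Int, l.foldl max c = c ∨ l.foldl max c ∈ l := by
  induction l with
  | nil => intro c; left; rfl
  | cons x t ih =>
    intro c
    simp only [List.foldl_cons]
    rcases ih (max c x) with h | h
    · by_cases hx : c ≤ x
      · right; rw [h, max_eq_right hx]; exact List.mem_cons_self
      · left; rw [h, max_eq_left ((not_le.mp hx).le)]
    · right; exact List.mem_cons_of_mem _ h

lemma pv_le_foldl_max (l : List Int) : ∀ c : Int, c ≤ l.foldl max c := by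
  induction l with
  | nil => intro c; exact le_refl c
  | cons x t ih =>
    intro c
    simp only [List.foldl_cons]
    exact le_trans (le_max_left c x) (ih (max c x))

lemma pv_foldl_max_absorb (l : List Int) : ∀ a b : Int, l.foldl max (max a b) = max a (l.foldl max b) := by
  induction l with
  | nil => intro a b; rfl
  | cons x t ih =>
    intro a b
    simp only [List.foldl_cons, max_assoc]
    exact ih a (max b x)

-- characterisation of A's inner scan: final max, and the dict gets the first index of the max iff it beats the seed
lemma pv_inner_spec (vec : List Int) : ∀ (c s : Int) (d : PySem.Dict Int Int) (k : Int),
    (PySem.List.enumerate vec s).foldl (pvStepA k) (c, d) =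
      (vec.foldl max c,
       if vec.foldl max c > c
       then d.insert k (s + (((PySem.List.index? vec (vec.foldl max c)).getD 0 : Nat) : Int))
       else d) := by
  induction vec with
  | nil =>
    intro c s d k
    simp [PySem.List.enumerate_nil]
  | cons x t ih =>
    intro c s d k
    rw [PySem.List.enumerate_cons]
    simp only [List.foldl_cons, pvStepA]
    by_cases hx : x > c
    · rw [if_pos hx, ih x (s + 1) (d.insert k s) k]
      have hcx : max c x = x := max_eq_right (le_of_lt hx)
      by_cases hM : t.foldl max x > x
      · -- the true max is in the tail
        have hmem : t.foldl max x ∈ t := by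
          rcases pv_foldl_max_mem t x with h | h
          · omega
          · exact h
        have hsome : (PySem.List.index? t (t.foldl max x)).isSome := by
          rw [PySem.List.index?_isSome_iff]; exact hmem
        obtain ⟨j, hj⟩ := Option.isSome_iff_exists.mp hsome
        have hxne : x ≠ t.foldl max x := by omega
        have hidx : PySem.List.index? (x :: t) (t.foldl max x) = some (j + 1) := by
          rw [PySem.List.index?_cons_of_ne _ hxne, hj]; rfl
        have hgt : t.foldl max x > c := lt_trans hx hM
        rw [if_pos hM, PySem.Dict.insert_insert_self]
        simp only [hcx, hidx, hj, if_pos hgt, Option.getD_some]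
        congr 2
        push_cast
        ring
      · -- the head x is itself the max
        have hxmax : t.foldl max x = x := le_antisymm (by omega) (pv_le_foldl_max t x)
        rw [if_neg hM]
        simp only [hcx, hxmax, if_pos hx, PySem.List.index?_cons_self,
          Option.getD_some, Nat.cast_zero, add_zero]
    · rw [if_neg hx]
      rw [ih c (s + 1) d k]
      have hcx : max c x = c := max_eq_left (by omega)
      simp only [hcx]
      by_cases hM : t.foldl max c > c
      · have hmem : t.foldl max c ∈ t := by
          rcases pv_foldl_max_mem t c with h | h
          · omega
          · exact h
        have hsome : (PySem.List.index? t (t.foldl max c)).isSome := by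
          rw [PySem.List.index?_isSome_iff]; exact hmem
        obtain ⟨j, hj⟩ := Option.isSome_iff_exists.mp hsome
        have hxne : x ≠ t.foldl max c := by omega
        have hidx : PySem.List.index? (x :: t) (t.foldl max c) = some (j + 1) := by
          rw [PySem.List.index?_cons_of_ne _ hxne, hj]; rfl
        simp only [if_pos hM, hidx, hj, Option.getD_some]
        congr 2
        push_cast
        ring
      · simp only [if_neg hM]

-- A's per-key body equals B's per-key body, for every key and accumulator
lemma pv_body_eq (avd : PySem.Dict Int (List Int)) (cld : PySem.Dict Int (List Int)) (k : Int) (d : PySem.Dict Int Int) :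
    (match cld.get? k with
     | none => d
     | some cvec =>
       if cvec.length > 1 then ((PySem.List.enumerate (avd.getD k []) 0).foldl (pvStepA k) (0, d)).2 else d)
    =
    (if (cld.getD k []).length > 1 ∧ (avd.getD k []) ≠ [] then
       match PySem.List.max? (avd.getD k []) (fun x => x) with
       | some m => if m > 0 then d.insert k (((PySem.List.index? (avd.getD k []) m).getD 0 : Nat) : Int) else d
       | none => d
     else d) := by
  cases hcl : cld.get? k with
  | none =>
    simp [PySem.Dict.getD_eq_get?_getD, hcl]
  | some cvec =>
    have hg : cld.getD k ([] : List Int) = cvec := by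
      rw [PySem.Dict.getD_eq_get?_getD, hcl]; rfl
    rw [hg]
    by_cases hlen : cvec.length > 1
    · simp only [if_pos hlen]
      cases hvec : avd.getD k [] with
      | nil => simp [PySem.List.enumerate_nil]
      | cons x t =>
        rw [pv_inner_spec (x :: t) 0 0 d k]
        have hmax : PySem.List.max? (x :: t) (fun x => x) = some (t.foldl max x) :=
          PySem.List.max?_id_cons x t
        have hM0 : (x :: t).foldl max 0 = max 0 (t.foldl max x) := by
          simp only [List.foldl_cons]
          rw [← pv_foldl_max_absorb t 0 x]
        by_cases hMv : t.foldl max x > 0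
        · have h0 : (x :: t).foldl max 0 = t.foldl max x := by
            rw [hM0, max_eq_right (le_of_lt hMv)]
          simp [hmax, h0, hMv, hlen, List.cons_ne_nil]
        · have h0 : (x :: t).foldl max 0 = 0 := by
            rw [hM0, max_eq_left (by omega)]
          simp [hmax, h0, hMv, hlen]
    · simp [hlen]

theorem compute_max_j_Rij_spec : Claim_equal_compute_max_j_Rij := by
  intro av mj cl _ _
  unfold Spec_compute_max_j_Rij compute_max_j_Rij compute_max_j_Rij_alt
  apply congrArg PySem.Dict.items
  rw [PySem.Dict.items_eq_map_keys (PySem.Dict.ofList av) (PySem.Dict.nodup_keys_ofList av) ([] : List Int),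
    List.foldl_map]
  apply List.foldl_ext
  intro d k _
  exact pv_body_eq (PySem.Dict.ofList av) (PySem.Dict.ofList cl) k d
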